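-- pv_equiv track=rewrite | github.com/Penitto/go_documentation | go_template/generator.py | _mask_raw_string_literal
-- ===== SOURCE A (Python) =====
-- from typing import Callable, Dict, Iterable, List, Optional, Tuple
--
-- def _mask_raw_string_literal(chars: List[str], source: str, start: int) -> int:
--     i = start + 1
--     length = len(source)
--     while i < length:
--         ch = source[i]
--         if ch == "`":
--             return i + 1
--         chars[i] = " " if ch != "\n" else "\n"
--         i += 1
--     return length
-- ===== SOURCE B (Python) =====
-- def _mask_raw_string_literal(chars, source, start):
--     j = source.find("`", start + 1)
--     end = len(source) if j == -1 else j
--     for i in range(start + 1, end):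
--         chars[i] = "\n" if source[i] == "\n" else " "
--     return len(source) if j == -1 else j + 1
-- ===== Notes on version B (the rewrite author's own statement) =====
-- stated objective: alternative
-- what changed: B first locates the terminating backtick with one str.find library scan, then masks the interior with a separate bounded range loop, instead of A's single fused scan that interleaves the backtick test with each write.
-- outside the precondition, e.g. on _mask_raw_string_literal(['b', 'a', 'b', 'a', 'b', 'a', 'b'], ' \n`', -4): A returns 0, B returns 3
import Mathlib
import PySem

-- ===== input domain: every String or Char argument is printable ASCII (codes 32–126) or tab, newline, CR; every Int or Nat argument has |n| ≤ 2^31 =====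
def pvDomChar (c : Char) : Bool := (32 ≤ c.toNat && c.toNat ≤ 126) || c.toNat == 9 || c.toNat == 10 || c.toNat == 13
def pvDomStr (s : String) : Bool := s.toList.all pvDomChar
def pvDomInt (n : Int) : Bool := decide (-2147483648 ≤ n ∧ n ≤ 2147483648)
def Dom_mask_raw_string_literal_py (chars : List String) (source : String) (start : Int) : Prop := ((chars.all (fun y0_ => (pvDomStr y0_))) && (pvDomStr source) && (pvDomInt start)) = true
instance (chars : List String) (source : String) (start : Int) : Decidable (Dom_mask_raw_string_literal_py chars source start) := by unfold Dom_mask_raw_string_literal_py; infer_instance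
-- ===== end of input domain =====

-- B separates locating the terminating backtick (one str.find scan) from masking the
-- interior, instead of A's fused scan; same cost. A (and B) mutate `chars` in place in
-- Python; the equivalence proved here is about the RETURN value only (the writes to
-- `chars` never influence the return, and within Pre_ both Pythons perform the same writes).

-- ===== PORT A =====
-- A's while-loop: scan from index i for a backtick; the `chars[i] = …` writes only
-- mutate the argument and never affect the return value, so they are not modeled.
def maskAGo (s : List Char) (i : Nat) : Int :=
  if h : i < s.length then
    if s[i] = '`' then ((i : Int) + 1) else maskAGo s (i + 1)
  else (s.length : Int)
termination_by s.length - i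

-- Under Pre_ we have -1 ≤ start, so (start+1).toNat is exactly start+1 (no clamping).
def mask_raw_string_literal_py (chars : List String) (source : String) (start : Int) : Int :=
  maskAGo source.toList (start + 1).toNat

-- ===== PORT B =====
-- j = source.find('`', start+1); masking loop omitted (writes only); return j+1 or len.
def mask_raw_string_literal_py_alt (chars : List String) (source : String) (start : Int) : Int :=
  let j := PySem.Str.findFrom source "`" (start + 1)
  if j = -1 then PySem.Str.len source else j + 1

-- ===== PRECONDITION & SPEC =====
-- Pre_ excludes (a) start < -1, where Python's negative-index wraparound makes A's value
-- (when it returns at all) an accident of the implementation, and (b) inputs where the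
-- masking loop writes past the end of `chars`, on which A raises IndexError.
def Pre_mask_raw_string_literal_py (chars : List String) (source : String) (start : Int) : Prop :=
  -1 ≤ start ∧
  ∀ i ∈ List.range source.toList.length,
    (start + 1 ≤ (i : Int) ∧ chars.length ≤ i) →
      ∃ j ∈ List.range (i + 1), start + 1 ≤ (j : Int) ∧ source.toList[j]? = some '`'
instance (chars : List String) (source : String) (start : Int) : Decidable (Pre_mask_raw_string_literal_py chars source start) := by unfold Pre_mask_raw_string_literal_py; infer_instance

def pvWitness_mask_raw_string_literal_py : List String × String × Int := (["x"], "a`b", 0)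

def Spec_mask_raw_string_literal_py (chars : List String) (source : String) (start : Int) (out : Int) : Prop := out = mask_raw_string_literal_py_alt chars source start
instance (chars : List String) (source : String) (start : Int) (out : Int) : Decidable (Spec_mask_raw_string_literal_py chars source start out) := by unfold Spec_mask_raw_string_literal_py; infer_instance

-- ===== CLAIM (what is proved, stated in full; the proofs are below) =====
def Claim_equal_mask_raw_string_literal_py : Prop := ∀ (chars : List String) (source : String) (start : Int), Dom_mask_raw_string_literal_py chars source start → Pre_mask_raw_string_literal_py chars source start → Spec_mask_raw_string_literal_py chars source start (mask_raw_string_literal_py chars source start)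

-- ===== LEMMAS AND PROOFS =====

lemma singleton_prefix_iff {a : α} {l : List α} : [a] <+: l ↔ l.head? = some a := by
  cases l with
  | nil => simp
  | cons b t =>
    constructor
    · rintro ⟨r, hr⟩; simp at hr; simp [hr.1]
    · intro h; simp at h; exact ⟨t, by simp [h]⟩

lemma singleton_infix_iff {a : α} {l : List α} : [a] <:+: l ↔ a ∈ l := by
  constructor
  · intro h; exact (List.singleton_sublist).mp h.sublist
  · intro h
    obtain ⟨s, t, hst⟩ := List.append_of_mem h
    exact ⟨s, t, by simp [hst]⟩

lemma maskAGo_none (s : List Char) (k : Nat)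
    (h : ∀ i, k ≤ i → s[i]? ≠ some '`') : maskAGo s k = (s.length : Int) := by
  unfold maskAGo
  split
  · rename_i hlt
    have : s[k]? = some s[k] := List.getElem?_eq_getElem hlt
    have hne : s[k] ≠ '`' := by
      intro hc; exact h k le_rfl (by rw [this, hc])
    rw [if_neg hne]
    exact maskAGo_none s (k + 1) (fun i hi => h i (by omega))
  · rfl
termination_by s.length - k

lemma maskAGo_first (s : List Char) (k m : Nat) (hk : k ≤ m)
    (hm : s[m]? = some '`')
    (hmin : ∀ i, k ≤ i → i < m → s[i]? ≠ some '`') :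
    maskAGo s k = (m : Int) + 1 := by
  have hmlt : m < s.length := by
    by_contra hc
    rw [List.getElem?_eq_none (by omega)] at hm; simp at hm
  unfold maskAGo
  rw [dif_pos (by omega)]
  by_cases hkm : k = m
  · subst hkm
    have : s[k] = '`' := by
      have := List.getElem?_eq_getElem hmlt
      rw [hm] at this; exact (Option.some.injEq _ _ ▸ this.symm)
    rw [if_pos this]
  · have hne : s[k] ≠ '`' := by
      intro hc
      exact hmin k le_rfl (by omega) (by rw [List.getElem?_eq_getElem (by omega), hc])
    rw [if_neg hne]
    exact maskAGo_first s (k + 1) m (by omega) hm (fun i hi => hmin i (by omega))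
termination_by m - k

lemma findFrom_of_len_lt (s sub : List Char) (k : Nat) (h : s.length < k) :
    PySem.Chars.findFrom s sub (k : Int) none = -1 := by
  simp only [PySem.Chars.findFrom]
  rw [if_neg (show ¬((k : Int) < 0) by omega)]
  rw [if_pos (by omega)]

-- the core equality: A's scan from k equals B's find-then-branch, for k = (start+1).toNat
lemma maskAGo_eq_find (s : List Char) (k : Nat) :
    maskAGo s k =
      (if PySem.Chars.findFrom s ['`'] (k : Int) none = -1 then (s.length : Int)
       else PySem.Chars.findFrom s ['`'] (k : Int) none + 1) := by
  by_cases hk : k ≤ s.length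
  · by_cases hf : PySem.Chars.findFrom s ['`'] (k : Int) none = -1
    · rw [if_pos hf]
      have hno : ¬ ['`'] <:+: s.drop k :=
        (PySem.Chars.findFrom_natCast_eq_neg_one_iff s ['`'] k hk).mp hf
      apply maskAGo_none
      intro i hi hc
      apply hno
      rw [singleton_infix_iff]
      have : (s.drop k)[i - k]? = some '`' := by
        rw [List.getElem?_drop]
        have : k + (i - k) = i := by omega
        rw [this]; exact hc
      exact List.mem_of_getElem? this
    · rw [if_neg hf]
      obtain ⟨hge, hpre, hmin⟩ := PySem.Chars.findFrom_natCast_spec s ['`'] k hk hf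
      set f := PySem.Chars.findFrom s ['`'] (k : Int) none with hfdef
      have hf0 : 0 ≤ f := le_trans (by positivity) hge
      have hfn : ((f.toNat : Nat) : Int) = f := Int.toNat_of_nonneg hf0
      have hch : s[f.toNat]? = some '`' := by
        rw [← List.head?_drop]; exact singleton_prefix_iff.mp hpre
      have := maskAGo_first s k f.toNat (by omega) hch
        (fun i hi hlt hc => hmin i hi hlt (by
          rw [singleton_prefix_iff, List.head?_drop]; exact hc))
      rw [this, hfn]
  · rw [not_le] at hk
    rw [findFrom_of_len_lt s ['`'] k hk, if_pos rfl]
    unfold maskAGo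
    rw [dif_neg (by omega)]

-- ===== VERDICT (by name: the statement is the Claim_ definition above) =====
theorem mask_raw_string_literal_py_spec : Claim_equal_mask_raw_string_literal_py := by
  intro chars source start _ hpre
  unfold Spec_mask_raw_string_literal_py mask_raw_string_literal_py mask_raw_string_literal_py_alt
  rw [PySem.Str.findFrom_eq, PySem.Str.len_eq]
  have hlit : ("`" : String).toList = ['`'] := by decide
  have h1 : -1 ≤ start := hpre.1
  have hst : ((start + 1).toNat : Int) = start + 1 := Int.toNat_of_nonneg (by omega)
  rw [hlit, ← hst]
  exact maskAGo_eq_find source.toList (start + 1).toNat
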